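-- pv_equiv track=rewrite | github.com/stickyptyltd-glitch/MindMend | backup/models/therapy_ai_integration.py | _analyze_technique_usage
-- ===== SOURCE A (Python) =====
-- from typing import Dict, Any, List
--
-- def _analyze_technique_usage(context: Dict[str, Any]) -> Dict[str, int]:
--     """Analyze therapeutic techniques used"""
--     techniques = {
--         'validation': 0,
--         'reframing': 0,
--         'skills_teaching': 0,
--         'homework_assignment': 0,
--         'mindfulness': 0
--     }
--
--     # Simple keyword analysis (in production, use NLP)
--     exchanges = context.get('exchanges', [])
--     for exchange in exchanges:
--         response_text = exchange.get('response', '').lower()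
--
--         if any(word in response_text for word in ['understand', 'hear', 'valid']):
--             techniques['validation'] += 1
--         if any(word in response_text for word in ['another way', 'perspective', 'reframe']):
--             techniques['reframing'] += 1
--         if any(word in response_text for word in ['practice', 'exercise', 'technique']):
--             techniques['skills_teaching'] += 1
--         if any(word in response_text for word in ['homework', 'practice this week', 'try']):
--             techniques['homework_assignment'] += 1
--         if any(word in response_text for word in ['mindful', 'present', 'breathing']):
--             techniques['mindfulness'] += 1
--
--     return techniques
-- ===== SOURCE B (Python) =====
-- _KEYWORD_TO_TECH = [
--     ('understand', 'validation'), ('hear', 'validation'), ('valid', 'validation'),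
--     ('another way', 'reframing'), ('perspective', 'reframing'), ('reframe', 'reframing'),
--     ('practice', 'skills_teaching'), ('exercise', 'skills_teaching'), ('technique', 'skills_teaching'),
--     ('homework', 'homework_assignment'), ('practice this week', 'homework_assignment'), ('try', 'homework_assignment'),
--     ('mindful', 'mindfulness'), ('present', 'mindfulness'), ('breathing', 'mindfulness'),
-- ]
--
-- def _analyze_technique_usage(context):
--     """Analyze therapeutic techniques used (single-scan multi-pattern matcher)."""
--     counts = {'validation': 0, 'reframing': 0, 'skills_teaching': 0,
--               'homework_assignment': 0, 'mindfulness': 0}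
--     for exchange in context.get('exchanges', []):
--         text = exchange.get('response', '').lower()
--         hit = set()
--         for i in range(len(text)):
--             for kw, tech in _KEYWORD_TO_TECH:
--                 if text.startswith(kw, i):
--                     hit.add(tech)
--         for tech in counts:
--             if tech in hit:
--                 counts[tech] += 1
--     return counts
-- ===== Notes on version B (the rewrite author's own statement) =====
-- stated objective: alternative
-- what changed: B replaces A's fifteen independent 'word in text' substring searches (five if-blocks of any()) by a single left-to-right scan of each lowercased response: at every position it tests which keywords of a flat (keyword, technique) table start there, collects the set of hit techniques, and then bumps the counters once per technique.
import Mathlib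
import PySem

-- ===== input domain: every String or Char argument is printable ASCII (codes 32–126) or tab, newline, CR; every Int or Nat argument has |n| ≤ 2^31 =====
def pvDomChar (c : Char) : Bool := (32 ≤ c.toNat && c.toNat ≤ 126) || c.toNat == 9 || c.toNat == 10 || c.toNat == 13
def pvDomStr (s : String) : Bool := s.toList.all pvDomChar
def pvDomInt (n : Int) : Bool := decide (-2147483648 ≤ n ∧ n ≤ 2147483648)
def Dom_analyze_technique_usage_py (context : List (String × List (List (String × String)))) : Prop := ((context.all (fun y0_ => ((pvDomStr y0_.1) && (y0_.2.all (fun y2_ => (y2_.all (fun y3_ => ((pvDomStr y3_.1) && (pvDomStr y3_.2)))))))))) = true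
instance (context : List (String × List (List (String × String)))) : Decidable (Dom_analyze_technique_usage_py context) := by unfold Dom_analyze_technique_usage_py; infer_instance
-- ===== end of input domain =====

-- B replaces A's fifteen independent `word in text` substring searches by a single
-- left-to-right scan of each response which tests, at every position, which keywords of a
-- flat (keyword, technique) table start there, collecting the set of hit techniques
-- (objective: alternative — a naive multi-pattern matcher instead of per-keyword searches).

-- ===== PORT A =====
def aStep (techniques : PySem.Dict String Int) (exchange : List (String × String)) : PySem.Dict String Int :=
  let response_text := PySem.Str.lower ((PySem.Dict.mk exchange).getD "response" "")
  let t1 := if ["understand", "hear", "valid"].any (fun word => PySem.Str.isIn word response_text) then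
      techniques.insert "validation" (techniques.getD "validation" 0 + 1) else techniques
  let t2 := if ["another way", "perspective", "reframe"].any (fun word => PySem.Str.isIn word response_text) then
      t1.insert "reframing" (t1.getD "reframing" 0 + 1) else t1
  let t3 := if ["practice", "exercise", "technique"].any (fun word => PySem.Str.isIn word response_text) then
      t2.insert "skills_teaching" (t2.getD "skills_teaching" 0 + 1) else t2
  let t4 := if ["homework", "practice this week", "try"].any (fun word => PySem.Str.isIn word response_text) then
      t3.insert "homework_assignment" (t3.getD "homework_assignment" 0 + 1) else t3
  let t5 := if ["mindful", "present", "breathing"].any (fun word => PySem.Str.isIn word response_text) then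
      t4.insert "mindfulness" (t4.getD "mindfulness" 0 + 1) else t4
  t5

def analyze_technique_usage_py (context : List (String × List (List (String × String)))) : List (String × Int) :=
  let techniques : PySem.Dict String Int :=
    ((((PySem.Dict.empty.insert "validation" 0).insert "reframing" 0).insert
        "skills_teaching" 0).insert "homework_assignment" 0).insert "mindfulness" 0
  let exchanges := (PySem.Dict.mk context).getD "exchanges" []
  (exchanges.foldl aStep techniques).items

-- ===== PORT B =====
def bPairs : List (String × String) :=
  [("understand", "validation"), ("hear", "validation"), ("valid", "validation"),
   ("another way", "reframing"), ("perspective", "reframing"), ("reframe", "reframing"),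
   ("practice", "skills_teaching"), ("exercise", "skills_teaching"), ("technique", "skills_teaching"),
   ("homework", "homework_assignment"), ("practice this week", "homework_assignment"), ("try", "homework_assignment"),
   ("mindful", "mindfulness"), ("present", "mindfulness"), ("breathing", "mindfulness")]

-- text.startswith(kw, i) for 0 ≤ i: exact as prefix test on the i-dropped character list
def bHitStep (cs : List Char) (hit : PySem.Set String) (i : Nat) : PySem.Set String :=
  bPairs.foldl (fun h p => if PySem.Chars.startswith (cs.drop i) p.1.toList then h.add p.2 else h) hit

def bHits (cs : List Char) : PySem.Set String :=
  (List.range cs.length).foldl (bHitStep cs) PySem.Set.empty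

def bStep (counts : PySem.Dict String Int) (exchange : List (String × String)) : PySem.Dict String Int :=
  let text := PySem.Str.lower ((PySem.Dict.mk exchange).getD "response" "")
  let hit := bHits text.toList
  counts.keys.foldl (fun c tech => if hit.contains tech then c.insert tech (c.getD tech 0 + 1) else c) counts

def analyze_technique_usage_py_alt (context : List (String × List (List (String × String)))) : List (String × Int) :=
  let counts : PySem.Dict String Int :=
    PySem.Dict.mk [("validation", 0), ("reframing", 0), ("skills_teaching", 0),
      ("homework_assignment", 0), ("mindfulness", 0)]
  let exchanges := (PySem.Dict.mk context).getD "exchanges" []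
  (exchanges.foldl bStep counts).items

-- ===== PRECONDITION & SPEC =====
def Spec_analyze_technique_usage_py (context : List (String × List (List (String × String)))) (out : List (String × Int)) : Prop := out = analyze_technique_usage_py_alt context
instance (context : List (String × List (List (String × String)))) (out : List (String × Int)) : Decidable (Spec_analyze_technique_usage_py context out) := by unfold Spec_analyze_technique_usage_py; infer_instance

-- ===== CLAIM (what is proved, stated in full; the proofs are below) =====
def Claim_equal_analyze_technique_usage_py : Prop := ∀ (context : List (String × List (List (String × String)))), Dom_analyze_technique_usage_py context → Spec_analyze_technique_usage_py context (analyze_technique_usage_py context)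

-- ===== LEMMAS AND PROOFS =====

def dict5 (v r s h m : Int) : PySem.Dict String Int :=
  PySem.Dict.mk [("validation", v), ("reframing", r), ("skills_teaching", s),
    ("homework_assignment", h), ("mindfulness", m)]

theorem d5_ins_v (v r s h m x : Int) : (dict5 v r s h m).insert "validation" x = dict5 x r s h m := by
  simp [dict5, PySem.Dict.insert, PySem.Dict.contains]

theorem d5_ins_r (v r s h m x : Int) : (dict5 v r s h m).insert "reframing" x = dict5 v x s h m := by
  simp [dict5, PySem.Dict.insert, PySem.Dict.contains]

theorem d5_ins_s (v r s h m x : Int) : (dict5 v r s h m).insert "skills_teaching" x = dict5 v r x h m := by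
  simp [dict5, PySem.Dict.insert, PySem.Dict.contains]

theorem d5_ins_h (v r s h m x : Int) : (dict5 v r s h m).insert "homework_assignment" x = dict5 v r s x m := by
  simp [dict5, PySem.Dict.insert, PySem.Dict.contains]

theorem d5_ins_m (v r s h m x : Int) : (dict5 v r s h m).insert "mindfulness" x = dict5 v r s h x := by
  simp [dict5, PySem.Dict.insert, PySem.Dict.contains]

theorem d5_get_v (v r s h m : Int) : (dict5 v r s h m).getD "validation" 0 = v := by
  simp [dict5, PySem.Dict.getD, PySem.Dict.get?]

theorem d5_get_r (v r s h m : Int) : (dict5 v r s h m).getD "reframing" 0 = r := by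
  simp [dict5, PySem.Dict.getD, PySem.Dict.get?]

theorem d5_get_s (v r s h m : Int) : (dict5 v r s h m).getD "skills_teaching" 0 = s := by
  simp [dict5, PySem.Dict.getD, PySem.Dict.get?]

theorem d5_get_h (v r s h m : Int) : (dict5 v r s h m).getD "homework_assignment" 0 = h := by
  simp [dict5, PySem.Dict.getD, PySem.Dict.get?]

theorem d5_get_m (v r s h m : Int) : (dict5 v r s h m).getD "mindfulness" 0 = m := by
  simp [dict5, PySem.Dict.getD, PySem.Dict.get?]

theorem d5_keys (v r s h m : Int) : (dict5 v r s h m).keys =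
    ["validation", "reframing", "skills_teaching", "homework_assignment", "mindfulness"] := by
  simp [dict5, PySem.Dict.keys]

-- membership through one position's pass over the keyword table
theorem bPass_contains (cs : List Char) (i : Nat) (hit : PySem.Set String) (t : String) :
    (bHitStep cs hit i).contains t =
      (hit.contains t || bPairs.any (fun p => PySem.Chars.startswith (cs.drop i) p.1.toList && p.2 == t)) := by
  unfold bHitStep
  generalize bPairs = l
  induction l generalizing hit with
  | nil => simp
  | cons p l ih =>
      rw [List.foldl_cons, List.any_cons]
      have hadd : ∀ (s : PySem.Set String), (s.add p.2).contains t = (s.contains t || (p.2 == t)) := by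
        intro s
        rw [Bool.eq_iff_iff]
        simp only [PySem.Set.contains_iff, Bool.or_eq_true, beq_iff_eq, PySem.Set.mem_add]
        exact or_congr Iff.rfl eq_comm
      by_cases hsw : PySem.Chars.startswith (cs.drop i) p.1.toList
      · rw [if_pos hsw, ih, hadd, hsw]
        simp [Bool.or_assoc]
      · rw [if_neg hsw, ih]
        simp [hsw]

-- membership in the full scan
theorem bHits_contains (cs : List Char) (t : String) :
    (bHits cs).contains t =
      (List.range cs.length).any
        (fun i => bPairs.any (fun p => PySem.Chars.startswith (cs.drop i) p.1.toList && p.2 == t)) := by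
  unfold bHits
  generalize cs.length = n
  induction n with
  | zero => rw [List.range_zero]; rfl
  | succ n ih =>
      rw [List.range_succ, List.foldl_append, List.any_append]
      simp only [List.foldl_cons, List.foldl_nil, List.any_cons, List.any_nil, Bool.or_false]
      rw [bPass_contains, ih]

-- a position-bounded scan for one keyword is exactly Python's `kw in text`
theorem any_startswith_eq_isIn (cs kw : List Char) (hk : kw ≠ []) :
    (List.range cs.length).any (fun i => PySem.Chars.startswith (cs.drop i) kw) =
      PySem.Chars.isIn kw cs := by
  rw [Bool.eq_iff_iff]
  simp only [List.any_eq_true, List.mem_range, PySem.Chars.startswith_iff]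
  rw [← PySem.Chars.exists_prefix_drop_iff_isIn]
  constructor
  · rintro ⟨i, _, hp⟩; exact ⟨i, hp⟩
  · rintro ⟨j, hp⟩
    by_cases hj : j < cs.length
    · exact ⟨j, hj, hp⟩
    · exfalso
      rw [List.drop_eq_nil_of_le (by omega)] at hp
      exact hk (List.prefix_nil.mp hp)

theorem toList_ne_nil_of_ne_empty (w : String) (h : w ≠ "") : w.toList ≠ [] := by
  intro h0
  exact h (by rwa [show ([] : List Char) = "".toList from rfl, String.toList_inj] at h0)

-- the hit set, technique by technique
theorem hits_eq (cs : List Char) (t : String) (ws : List String)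
    (hw : bPairs.filter (fun p => p.2 == t) = ws.map (fun w => (w, t)))
    (hne : ∀ w ∈ ws, w ≠ "") :
    (bHits cs).contains t = ws.any (fun w => PySem.Chars.isIn w.toList cs) := by
  rw [bHits_contains]
  have h1 : ∀ i : Nat,
      bPairs.any (fun p => PySem.Chars.startswith (cs.drop i) p.1.toList && p.2 == t) =
      ws.any (fun w => PySem.Chars.startswith (cs.drop i) w.toList) := by
    intro i
    rw [Bool.eq_iff_iff]
    simp only [List.any_eq_true, Bool.and_eq_true, beq_iff_eq]
    constructor
    · rintro ⟨p, hp, hsw, hpt⟩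
      have : p ∈ bPairs.filter (fun p => p.2 == t) := by
        simp [List.mem_filter, hp, hpt]
      rw [hw, List.mem_map] at this
      obtain ⟨w, hwmem, hweq⟩ := this
      exact ⟨w, hwmem, by rw [← hweq] at hsw; exact hsw⟩
    · rintro ⟨w, hwmem, hsw⟩
      have : (w, t) ∈ bPairs.filter (fun p => p.2 == t) := by
        rw [hw]; exact List.mem_map_of_mem hwmem
      exact ⟨(w, t), (List.mem_filter.mp this).1, hsw, rfl⟩
  calc (List.range cs.length).any
        (fun i => bPairs.any (fun p => PySem.Chars.startswith (cs.drop i) p.1.toList && p.2 == t))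
      = (List.range cs.length).any
        (fun i => ws.any (fun w => PySem.Chars.startswith (cs.drop i) w.toList)) := by
        simp only [h1]
    _ = ws.any (fun w => PySem.Chars.isIn w.toList cs) := by
        rw [Bool.eq_iff_iff]
        simp only [List.any_eq_true]
        constructor
        · rintro ⟨i, hi, w, hwmem, hsw⟩
          refine ⟨w, hwmem, ?_⟩
          rw [← any_startswith_eq_isIn cs w.toList (toList_ne_nil_of_ne_empty w (hne w hwmem))]
          exact List.any_eq_true.mpr ⟨i, hi, hsw⟩
        · rintro ⟨w, hwmem, hin⟩
          have := (any_startswith_eq_isIn cs w.toList (toList_ne_nil_of_ne_empty w (hne w hwmem))).symm ▸ hin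
          obtain ⟨i, hi, hsw⟩ := List.any_eq_true.mp this
          exact ⟨i, hi, w, hwmem, hsw⟩

theorem bStep_mk (e : List (String × String)) (v r s h m : Int) :
    bStep (dict5 v r s h m) e = aStep (dict5 v r s h m) e := by
  have hv := hits_eq (PySem.Str.lower ((PySem.Dict.mk e).getD "response" "")).toList
      "validation" ["understand", "hear", "valid"] (by decide) (by decide)
  have hr := hits_eq (PySem.Str.lower ((PySem.Dict.mk e).getD "response" "")).toList
      "reframing" ["another way", "perspective", "reframe"] (by decide) (by decide)
  have hs := hits_eq (PySem.Str.lower ((PySem.Dict.mk e).getD "response" "")).toList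
      "skills_teaching" ["practice", "exercise", "technique"] (by decide) (by decide)
  have hh := hits_eq (PySem.Str.lower ((PySem.Dict.mk e).getD "response" "")).toList
      "homework_assignment" ["homework", "practice this week", "try"] (by decide) (by decide)
  have hm := hits_eq (PySem.Str.lower ((PySem.Dict.mk e).getD "response" "")).toList
      "mindfulness" ["mindful", "present", "breathing"] (by decide) (by decide)
  simp only [bStep, aStep, d5_keys, List.foldl_cons, List.foldl_nil]
  simp only [hv, hr, hs, hh, hm]
  -- both sides now branch on the same five Boolean conditions (B's isIn over toList = A's Str.isIn)
  simp only [PySem.Str.isIn_eq]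
  split_ifs <;>
    simp only [d5_ins_v, d5_ins_r, d5_ins_s, d5_ins_h, d5_ins_m,
      d5_get_v, d5_get_r, d5_get_s, d5_get_h, d5_get_m]

theorem loop_eq (exs : List (List (String × String))) (v r s h m : Int) :
    exs.foldl aStep (dict5 v r s h m) = exs.foldl bStep (dict5 v r s h m) := by
  induction exs generalizing v r s h m with
  | nil => rfl
  | cons e exs ih =>
      rw [List.foldl_cons, List.foldl_cons, bStep_mk]
      -- aStep keeps the dict5 shape: evaluate its five conditional updates
      simp only [aStep]
      split_ifs <;>
        (try simp only [d5_ins_v, d5_ins_r, d5_ins_s, d5_ins_h, d5_ins_m,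
          d5_get_v, d5_get_r, d5_get_s, d5_get_h, d5_get_m]) <;>
        exact ih _ _ _ _ _

-- ===== VERDICT (by name: the statement is the Claim_ definition above) =====
theorem analyze_technique_usage_py_spec : Claim_equal_analyze_technique_usage_py := by
  intro context _
  show _ = _
  simp only [analyze_technique_usage_py, analyze_technique_usage_py_alt]
  have hinit : ((((PySem.Dict.empty.insert "validation" (0 : Int)).insert "reframing" 0).insert
      "skills_teaching" 0).insert "homework_assignment" 0).insert "mindfulness" 0 =
      dict5 0 0 0 0 0 := by decide
  have hinit2 : PySem.Dict.mk [("validation", (0 : Int)), ("reframing", 0), ("skills_teaching", 0),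
      ("homework_assignment", 0), ("mindfulness", 0)] = dict5 0 0 0 0 0 := rfl
  rw [hinit, hinit2, loop_eq]
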